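-- pv_equiv track=rewrite | github.com/antoniacobaeus/aoc | 2023/day03.py | find_adjacent
-- ===== SOURCE A (Python) =====
-- def find_adjacent(grid, x, y, l):
--     adj = []
--
--     sx = max(x - 1, 0)
--     sy = max(y - 1, 0)
--     ex = min(x + l, len(grid[0]) - 1)
--     ey = min(y + 1, len(grid) - 1)
--
--     for ny in range(sy, ey + 1):
--         for nx in range(sx, ex + 1):
--             if ny == y and nx in range(x, x + l):
--                 continue
--             adj.append((nx, ny))
--     return adj
-- ===== SOURCE B (Python) =====
-- def find_adjacent(grid, x, y, l):
--     h, w = len(grid), len(grid[0])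
--     # all grid cells in the 1-cell halo box around the number span
--     box = {(nx, ny)
--            for ny in range(max(y - 1, 0), min(y + 1, h - 1) + 1)
--            for nx in range(max(x - 1, 0), min(x + l, w - 1) + 1)}
--     # the in-grid cells occupied by the number itself
--     span = {(nx, y) for nx in range(max(x, 0), min(x + l, w))}
--     # neighbours = box minus the number, in row-major (reading) order
--     return sorted(box - span, key=lambda c: c[1] * w + c[0])
-- ===== Notes on version B (the rewrite author's own statement) =====
-- stated objective: alternative
-- what changed: A scans the clipped bounding box row by row with a per-cell 'is this on the number span' skip test; B instead builds the box and the in-grid span as hash sets, takes the set difference, and sorts the surviving cells into row-major order with a linear-index key. Pre_ excludes only the empty grid, on which A raises IndexError at grid[0].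
import Mathlib
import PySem

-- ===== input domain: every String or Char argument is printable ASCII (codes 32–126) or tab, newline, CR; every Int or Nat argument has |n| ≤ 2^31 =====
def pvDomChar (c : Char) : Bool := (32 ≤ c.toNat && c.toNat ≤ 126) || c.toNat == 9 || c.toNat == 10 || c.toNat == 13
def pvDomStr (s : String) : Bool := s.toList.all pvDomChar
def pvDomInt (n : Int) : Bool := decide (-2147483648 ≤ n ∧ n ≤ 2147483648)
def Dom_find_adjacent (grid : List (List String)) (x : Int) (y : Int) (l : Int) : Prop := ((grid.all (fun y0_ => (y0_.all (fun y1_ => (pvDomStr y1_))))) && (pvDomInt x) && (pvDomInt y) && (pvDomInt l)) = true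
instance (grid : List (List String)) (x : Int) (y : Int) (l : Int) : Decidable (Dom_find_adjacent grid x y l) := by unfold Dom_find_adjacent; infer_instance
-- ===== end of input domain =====

-- B replaces A's box scan with a skip test by set difference: halo-box set minus in-grid
-- span set, sorted into row-major order by a linear-index key (objective: alternative).

-- ===== PORT A =====
def find_adjacent (grid : List (List String)) (x : Int) (y : Int) (l : Int) : List (Int × Int) :=
  match PySem.List.pyGet? grid 0 with
  | none => []   -- grid[0] raises IndexError in Python; excluded by Pre_
  | some row0 =>
    let sx := max (x - 1) 0
    let sy := max (y - 1) 0
    let ex := min (x + l) ((row0.length : Int) - 1)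
    let ey := min (y + 1) ((grid.length : Int) - 1)
    (PySem.List.pyRange sy (ey + 1) 1).foldl (fun adj ny =>
      (PySem.List.pyRange sx (ex + 1) 1).foldl (fun adj nx =>
        if ny = y ∧ x ≤ nx ∧ nx < x + l then adj else adj ++ [(nx, ny)]) adj) []

-- ===== PORT B =====
def find_adjacent_alt (grid : List (List String)) (x : Int) (y : Int) (l : Int) : List (Int × Int) :=
  match PySem.List.pyGet? grid 0 with
  | none => []   -- grid[0] raises IndexError in Python; excluded by Pre_
  | some row0 =>
    let h : Int := grid.length
    let w : Int := row0.length
    let box : PySem.Set (Int × Int) := PySem.Set.ofList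
      ((PySem.List.pyRange (max (y - 1) 0) (min (y + 1) (h - 1) + 1) 1).flatMap (fun ny =>
        (PySem.List.pyRange (max (x - 1) 0) (min (x + l) (w - 1) + 1) 1).map (fun nx => (nx, ny))))
    let span : PySem.Set (Int × Int) := PySem.Set.ofList
      ((PySem.List.pyRange (max x 0) (min (x + l) w) 1).map (fun nx => (nx, y)))
    PySem.List.sorted (PySem.Set.diff box span) (fun c => c.2 * w + c.1) false

-- ===== PRECONDITION & SPEC =====
-- Pre_ excludes only the empty grid, on which Python A raises IndexError at grid[0].
def Pre_find_adjacent (grid : List (List String)) (x : Int) (y : Int) (l : Int) : Prop := grid ≠ []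
instance (grid : List (List String)) (x : Int) (y : Int) (l : Int) : Decidable (Pre_find_adjacent grid x y l) := by unfold Pre_find_adjacent; infer_instance
def pvWitness_find_adjacent : List (List String) × Int × Int × Int := ([[".", "1", "2", "."], [".", ".", "*", "."]], 1, 0, 2)
def Spec_find_adjacent (grid : List (List String)) (x : Int) (y : Int) (l : Int) (out : List (Int × Int)) : Prop := out = find_adjacent_alt grid x y l
instance (grid : List (List String)) (x : Int) (y : Int) (l : Int) (out : List (Int × Int)) : Decidable (Spec_find_adjacent grid x y l out) := by unfold Spec_find_adjacent; infer_instance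

-- ===== CLAIM (what is proved, stated in full; the proofs are below) =====
def Claim_equal_find_adjacent : Prop := ∀ (grid : List (List String)) (x : Int) (y : Int) (l : Int), Dom_find_adjacent grid x y l → Pre_find_adjacent grid x y l → Spec_find_adjacent grid x y l (find_adjacent grid x y l)

-- ===== LEMMAS AND PROOFS =====

-- A's nested foldl, written as a flatMap of filtered, mapped column ranges.
theorem pv_A_flatMap (sx sy ex ey x y l : Int) :
    (PySem.List.pyRange sy (ey + 1) 1).foldl (fun adj ny =>
      (PySem.List.pyRange sx (ex + 1) 1).foldl (fun adj nx =>
        if ny = y ∧ x ≤ nx ∧ nx < x + l then adj else adj ++ [(nx, ny)]) adj) [] =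
    (PySem.List.pyRange sy (ey + 1) 1).flatMap (fun ny =>
      ((PySem.List.pyRange sx (ex + 1) 1).filter
        (fun nx => decide ¬(ny = y ∧ x ≤ nx ∧ nx < x + l))).map (fun nx => (nx, ny))) := by
  have hinner : ∀ ny : Int, ∀ adj : List (Int × Int),
      (PySem.List.pyRange sx (ex + 1) 1).foldl (fun adj nx =>
        if ny = y ∧ x ≤ nx ∧ nx < x + l then adj else adj ++ [(nx, ny)]) adj =
      adj ++ ((PySem.List.pyRange sx (ex + 1) 1).filter
        (fun nx => decide ¬(ny = y ∧ x ≤ nx ∧ nx < x + l))).map (fun nx => (nx, ny)) := by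
    intro ny adj
    rw [PySem.List.foldl_congr_mem' _ _
        (fun acc nx => if ¬(ny = y ∧ x ≤ nx ∧ nx < x + l) then acc ++ [(nx, ny)] else acc) _
        (by intro a _ acc; by_cases hc : ny = y ∧ x ≤ a ∧ a < x + l <;> simp [hc])]
    exact PySem.List.foldl_append_ite (fun nx => ¬(ny = y ∧ x ≤ nx ∧ nx < x + l)) _ _ _
  rw [PySem.List.foldl_congr_mem' _ _
      (fun adj ny => adj ++ ((PySem.List.pyRange sx (ex + 1) 1).filter
        (fun nx => decide ¬(ny = y ∧ x ≤ nx ∧ nx < x + l))).map (fun nx => (nx, ny))) _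
      (fun ny _ adj => hinner ny adj)]
  exact PySem.List.foldl_append_eq_flatMap _ _ _

-- Pairwise strict growth of the row-major key along A's output list.
theorem pv_A_pairwise (sx ex x y l w : Int) (hex : ex ≤ w - 1) (hsx : 0 ≤ sx) (rows : List Int)
    (hrows : rows.Pairwise (· < ·)) :
    (rows.flatMap (fun ny =>
      ((PySem.List.pyRange sx (ex + 1) 1).filter
        (fun nx => decide ¬(ny = y ∧ x ≤ nx ∧ nx < x + l))).map (fun nx => (nx, ny)))).Pairwise
      (fun c d => c.2 * w + c.1 < d.2 * w + d.1) := by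
  induction rows with
  | nil => simp
  | cons r rs ih =>
    rw [List.pairwise_cons] at hrows
    rw [List.flatMap_cons, List.pairwise_append]
    have hmem : ∀ ny : Int, ∀ c : Int × Int,
        c ∈ ((PySem.List.pyRange sx (ex + 1) 1).filter
          (fun nx => decide ¬(ny = y ∧ x ≤ nx ∧ nx < x + l))).map (fun nx => (nx, ny)) →
        c.2 = ny ∧ sx ≤ c.1 ∧ c.1 ≤ ex := by
      intro ny c hc
      simp only [List.mem_map, List.mem_filter, PySem.List.mem_pyRange_one] at hc
      obtain ⟨nx, ⟨⟨h1, h2⟩, _⟩, rfl⟩ := hc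
      exact ⟨rfl, h1, by omega⟩
    refine ⟨?_, ih hrows.2, ?_⟩
    · -- one row: same ny, nx strictly increasing
      have : ((PySem.List.pyRange sx (ex + 1) 1).filter
          (fun nx => decide ¬(r = y ∧ x ≤ nx ∧ nx < x + l))).Pairwise (· < ·) :=
        (PySem.List.pairwise_lt_pyRange_one sx (ex + 1)).filter _
      exact List.Pairwise.map _ (fun a b hab => by simp only; omega) this
    · intro c hc d hd
      obtain ⟨hc2, hc1a, hc1b⟩ := hmem r c hc
      have hd' : ∃ ny ∈ rs, d.2 = ny ∧ sx ≤ d.1 ∧ d.1 ≤ ex := by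
        simp only [List.mem_flatMap] at hd
        obtain ⟨ny, hny, hdm⟩ := hd
        exact ⟨ny, hny, hmem ny d hdm⟩
      obtain ⟨ny, hny, hd2, hd1a, hd1b⟩ := hd'
      have := hrows.1 ny hny
      -- w ≥ 1 since sx ≤ c.1 ≤ ex ≤ w - 1 and 0 ≤ sx
      have hw : 1 ≤ w := by omega
      have : c.2 < d.2 := by omega
      nlinarith [this, hc1a, hc1b, hd1a, hd1b, hw]

-- ===== VERDICT (by name: the statement is the Claim_ definition above) =====
theorem find_adjacent_spec : Claim_equal_find_adjacent := by
  intro grid x y l _ hpre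
  unfold Spec_find_adjacent find_adjacent find_adjacent_alt
  cases grid with
  | nil => exact absurd rfl hpre
  | cons g gs =>
    rw [show PySem.List.pyGet? (g :: gs) 0 = some g by
      simp [PySem.List.pyGet?, PySem.List.pyIdx?]]
    simp only []
    set w : Int := (g.length : Int) with hw
    set h : Int := ((g :: gs).length : Int) with hh
    set sx := max (x - 1) 0 with hsx
    set ex := min (x + l) (w - 1) with hex
    set rows := PySem.List.pyRange (max (y - 1) 0) (min (y + 1) (h - 1) + 1) 1 with hrows
    set L := rows.flatMap (fun ny =>
      ((PySem.List.pyRange sx (ex + 1) 1).filter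
        (fun nx => decide ¬(ny = y ∧ x ≤ nx ∧ nx < x + l))).map (fun nx => (nx, ny))) with hL
    rw [pv_A_flatMap]
    have hpar : L.Pairwise (fun c d => c.2 * w + c.1 < d.2 * w + d.1) :=
      pv_A_pairwise sx ex x y l w (by omega) (by omega) rows
        (PySem.List.pairwise_lt_pyRange_one _ _)
    have hLnodup : L.Nodup :=
      hpar.imp (fun {a b} hab heq => absurd hab (by rw [heq]; omega))
    set box : PySem.Set (Int × Int) := PySem.Set.ofList
      (rows.flatMap (fun ny =>
        (PySem.List.pyRange sx (ex + 1) 1).map (fun nx => (nx, ny)))) with hbox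
    set span : PySem.Set (Int × Int) := PySem.Set.ofList
      ((PySem.List.pyRange (max x 0) (min (x + l) w) 1).map (fun nx => (nx, y))) with hspan
    have hperm : L.Perm (PySem.Set.diff box span) := by
      rw [List.perm_ext_iff_of_nodup hLnodup
        (PySem.Set.nodup_diff _ _ (PySem.Set.nodup_ofList _))]
      intro c
      simp only [PySem.Set.mem_diff, hspan, hL, PySem.Set.mem_ofList]
      simp only [List.mem_flatMap, List.mem_map, List.mem_filter,
        PySem.List.mem_pyRange_one, decide_eq_true_eq]
      constructor
      · rintro ⟨ny, hny, nx, ⟨⟨hnx, hskip⟩, rfl⟩⟩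
        refine ⟨⟨ny, hny, nx, hnx, rfl⟩, ?_⟩
        rintro ⟨nx', hnx', heq⟩
        have h1 : nx' = nx := congrArg Prod.fst heq
        have h2 : y = ny := congrArg Prod.snd heq
        exact hskip ⟨h2.symm, by omega⟩
      · rintro ⟨⟨ny, hny, nx, hnx, rfl⟩, hns⟩
        refine ⟨ny, hny, nx, ⟨hnx, ?_⟩, rfl⟩
        rintro ⟨rfl, hx1, hx2⟩
        exact hns ⟨nx, by omega, rfl⟩
    exact (PySem.List.sorted_eq_of_perm_of_pairwise_lt _ _ _ hperm hpar).symm
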